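-- pv_equiv track=rewrite | github.com/tbvanderwoude/icts-m | src/ictsm/conflicts.py | count_edge_collsions
-- ===== SOURCE A (Python) =====
-- def count_edge_collsions(curr_locs, next_locs) -> int:
--     count = 0
--     for (i, ei) in filter(
--         lambda p: p[1][0] != p[1][1], enumerate(zip(curr_locs, next_locs))
--     ):
--         for (j, ej) in filter(
--             lambda p: p[1][0] != p[1][1], enumerate(zip(next_locs, curr_locs))
--         ):
--             if j > i and ei == ej:
--                 count += 1
--     return count
-- ===== SOURCE B (Python) =====
-- def count_edge_collsions(curr_locs, next_locs) -> int:
--     seen = {}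
--     count = 0
--     for c, n in zip(curr_locs, next_locs):
--         if c != n:
--             count += seen.get((n, c), 0)
--             seen[(c, n)] = seen.get((c, n), 0) + 1
--     return count
-- ===== Notes on version B (the rewrite author's own statement) =====
-- stated objective: faster
-- what changed: Replaced the quadratic double loop over enumerated/filtered zips by a single pass that counts reversed edges seen so far in a hash map.
import Mathlib
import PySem

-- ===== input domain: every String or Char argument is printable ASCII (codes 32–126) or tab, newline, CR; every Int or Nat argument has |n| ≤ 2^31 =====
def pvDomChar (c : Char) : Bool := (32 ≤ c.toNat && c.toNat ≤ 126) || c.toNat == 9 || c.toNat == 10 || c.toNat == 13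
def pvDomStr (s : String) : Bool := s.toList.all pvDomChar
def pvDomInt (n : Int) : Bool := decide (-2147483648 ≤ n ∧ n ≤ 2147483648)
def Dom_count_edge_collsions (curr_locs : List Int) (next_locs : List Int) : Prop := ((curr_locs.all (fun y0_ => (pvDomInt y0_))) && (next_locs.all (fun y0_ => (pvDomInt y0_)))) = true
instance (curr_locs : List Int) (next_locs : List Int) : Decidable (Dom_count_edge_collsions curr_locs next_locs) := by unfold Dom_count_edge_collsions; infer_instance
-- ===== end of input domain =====

-- B replaces A's quadratic double loop by one pass with a hash map counting reversed edges seen so far.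

-- ===== PORT A =====
def count_edge_collsions (curr_locs : List Int) (next_locs : List Int) : Int :=
  ((PySem.List.enumerate (curr_locs.zip next_locs)).filter (fun p => p.2.1 ≠ p.2.2)).foldl
    (fun count ip =>
      ((PySem.List.enumerate (next_locs.zip curr_locs)).filter (fun p => p.2.1 ≠ p.2.2)).foldl
        (fun c jp => if jp.1 > ip.1 ∧ ip.2 = jp.2 then c + 1 else c) count)
    0

-- ===== PORT B =====
def pvBGo : List (Int × Int) → PySem.Dict (Int × Int) Int → Int → Int
  | [], _, count => count
  | (c, n) :: rest, seen, count =>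
    if c ≠ n then
      pvBGo rest (seen.insert (c, n) (seen.getD (c, n) 0 + 1)) (count + seen.getD (n, c) 0)
    else
      pvBGo rest seen count

def count_edge_collsions_alt (curr_locs : List Int) (next_locs : List Int) : Int :=
  pvBGo (curr_locs.zip next_locs) PySem.Dict.empty 0

-- ===== PRECONDITION & SPEC =====
def Spec_count_edge_collsions (curr_locs : List Int) (next_locs : List Int) (out : Int) : Prop := out = count_edge_collsions_alt curr_locs next_locs
instance (curr_locs : List Int) (next_locs : List Int) (out : Int) : Decidable (Spec_count_edge_collsions curr_locs next_locs out) := by unfold Spec_count_edge_collsions; infer_instance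

-- ===== CLAIM (what is proved, stated in full; the proofs are below) =====
def Claim_equal_count_edge_collsions : Prop := ∀ (curr_locs : List Int) (next_locs : List Int), Dom_count_edge_collsions curr_locs next_locs → Spec_count_edge_collsions curr_locs next_locs (count_edge_collsions curr_locs next_locs)

-- ===== LEMMAS AND PROOFS =====

-- number of non-degenerate entries of `prev` equal to `k`
def pvCnt (prev : List (Int × Int)) (k : Int × Int) : Int :=
  ((prev.filter (fun p => decide (p.1 ≠ p.2 ∧ p = k))).length : Int)

-- reference: left-to-right accumulation of reversed-edge matches in the processed prefix
def pvRef (prev : List (Int × Int)) : List (Int × Int) → Int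
  | [] => 0
  | p :: rest => (if p.1 ≠ p.2 then pvCnt prev (p.2, p.1) else 0) + pvRef (prev ++ [p]) rest

theorem pvCnt_append_singleton (prev : List (Int × Int)) (p k : Int × Int) :
    pvCnt (prev ++ [p]) k = pvCnt prev k + (if p.1 ≠ p.2 ∧ p = k then 1 else 0) := by
  simp only [pvCnt, List.filter_append, List.length_append, Nat.cast_add]
  congr 1
  split_ifs with h
  · obtain ⟨h1, rfl⟩ := h; simp [h1]
  · simp only [List.filter_cons, List.filter_nil]
    rw [if_neg]
    · simp
    · simpa using h

theorem pvBGo_eq_ref (L : List (Int × Int)) :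
    ∀ (prev : List (Int × Int)) (seen : PySem.Dict (Int × Int) Int) (count : Int),
      (∀ k, seen.getD k 0 = pvCnt prev k) →
      pvBGo L seen count = count + pvRef prev L := by
  induction L with
  | nil => intro prev seen count _; simp [pvBGo, pvRef]
  | cons p rest ih =>
    intro prev seen count hinv
    obtain ⟨c, n⟩ := p
    by_cases hcn : c ≠ n
    · rw [show pvBGo ((c, n) :: rest) seen count
          = pvBGo rest (seen.insert (c, n) (seen.getD (c, n) 0 + 1)) (count + seen.getD (n, c) 0)
          from by simp [pvBGo, hcn]]
      rw [ih (prev ++ [(c, n)]) _ _ ?_]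
      · rw [show pvRef prev ((c, n) :: rest)
            = (if c ≠ n then pvCnt prev (n, c) else 0) + pvRef (prev ++ [(c, n)]) rest from rfl]
        rw [hinv (n, c)]
        simp [hcn]
        ring
      · intro k
        rw [PySem.Dict.getD_insert, pvCnt_append_singleton]
        rw [hinv k, hinv (c, n)]
        split_ifs with h1 h2 h2 <;> simp_all
    · rw [show pvBGo ((c, n) :: rest) seen count = pvBGo rest seen count from by simp [pvBGo, hcn]]
      rw [ih (prev ++ [(c, n)]) _ _ ?_]
      · rw [show pvRef prev ((c, n) :: rest)
            = (if c ≠ n then pvCnt prev (n, c) else 0) + pvRef (prev ++ [(c, n)]) rest from rfl]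
        simp [hcn]
      · intro k
        rw [pvCnt_append_singleton, hinv k]
        simp [hcn]

theorem pvDict_empty_getD (k : Int × Int) : (PySem.Dict.empty : PySem.Dict (Int × Int) Int).getD k 0 = 0 := by
  rfl

def pvS (L : List (Int × Int)) : List (Int × (Int × Int)) :=
  (PySem.List.enumerate L).filter (fun q => q.2.1 ≠ q.2.2)

def pvG (L : List (Int × Int)) (ip : Int × (Int × Int)) : Int :=
  (((pvS (L.map Prod.swap)).countP (fun jp => decide (jp.1 > ip.1 ∧ ip.2 = jp.2))) : Int)

def pvAf (L : List (Int × Int)) : Int :=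
  ((PySem.List.enumerate L).filter (fun p => p.2.1 ≠ p.2.2)).foldl
    (fun count ip =>
      ((PySem.List.enumerate (L.map Prod.swap)).filter (fun p => p.2.1 ≠ p.2.2)).foldl
        (fun c jp => if jp.1 > ip.1 ∧ ip.2 = jp.2 then c + 1 else c) count)
    0

theorem pvAf_eq_sum (L : List (Int × Int)) : pvAf L = ((pvS L).map (pvG L)).sum := by
  unfold pvAf pvS pvG
  simp only [PySem.List.foldl_ite_add_one]
  rw [PySem.List.foldl_add]
  simp [pvS]

theorem pvEnum_fst_lt (L : List (Int × Int)) (ip : Int × (Int × Int))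
    (h : ip ∈ PySem.List.enumerate L) : ip.1 < (L.length : Int) := by
  rw [PySem.List.mem_enumerate_iff] at h
  obtain ⟨k, hk, rfl⟩ := h
  simp
  omega

theorem pvS_fst_lt (L : List (Int × Int)) (ip : Int × (Int × Int))
    (h : ip ∈ pvS L) : ip.1 < (L.length : Int) :=
  pvEnum_fst_lt L ip (List.mem_filter.mp h).1

theorem pvS_append (M : List (Int × Int)) (p : Int × Int) :
    pvS (M ++ [p]) = pvS M ++ (if p.1 ≠ p.2 then [((M.length : Int), p)] else []) := by
  simp only [pvS, PySem.List.enumerate_append, PySem.List.enumerate_cons,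
    PySem.List.enumerate_nil, List.filter_append]
  congr 1
  split_ifs with h <;> simp_all

theorem pvG_snoc (M : List (Int × Int)) (p : Int × Int) (ip : Int × (Int × Int))
    (hip : ip.1 < (M.length : Int)) :
    pvG (M ++ [p]) ip = pvG M ip + (if p.1 ≠ p.2 ∧ ip.2 = (p.2, p.1) then 1 else 0) := by
  unfold pvG
  rw [List.map_append, show [p].map Prod.swap = [(p.2, p.1)] from rfl, pvS_append]
  by_cases h : p.1 = p.2
  · simp [h]
  · rw [if_pos (by simpa using Ne.symm h), List.countP_append]
    push_cast
    congr 1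
    simp only [List.countP_cons, List.countP_nil, List.length_map]
    by_cases h3 : ip.2 = (p.2, p.1)
    · simp [h3, hip, h]
    · simp [h3, h]

theorem pvG_last (M : List (Int × Int)) (p : Int × Int) :
    pvG (M ++ [p]) ((M.length : Int), p) = 0 := by
  unfold pvG
  simp only [Int.natCast_eq_zero]
  rw [List.countP_eq_zero]
  intro jp hjp
  have hlt := pvS_fst_lt _ _ hjp
  simp only [List.length_map, List.length_append, List.length_cons, List.length_nil] at hlt
  simp only [decide_eq_true_eq, not_and, gt_iff_lt]
  intro hgt
  exfalso
  push_cast at hlt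
  omega

theorem pvCountP_enum_filter (M : List (Int × Int)) (k : Int × Int) (s : Int) :
    (((PySem.List.enumerate M s).filter (fun q => q.2.1 ≠ q.2.2)).countP
        (fun ip => decide (ip.2 = k)))
      = M.countP (fun q => decide (q.1 ≠ q.2 ∧ q = k)) := by
  induction M generalizing s with
  | nil => simp [PySem.List.enumerate_nil]
  | cons q rest ih =>
    simp only [PySem.List.enumerate_cons, List.filter_cons]
    have ih' := ih (s + 1)
    by_cases hq : q.1 = q.2
    · simp_all
    · simp_all [List.countP_cons]

theorem pvCnt_eq_countP (M : List (Int × Int)) (k : Int × Int) :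
    (((pvS M).countP (fun ip => decide (ip.2 = k))) : Int) = pvCnt M k := by
  unfold pvS pvCnt
  rw [pvCountP_enum_filter, ← List.countP_eq_length_filter]

theorem pvSum_map_ite_prop {α : Type} (P : α → Prop) [DecidablePred P] (xs : List α) :
    (xs.map (fun x => if P x then (1 : Int) else 0)).sum
      = ((xs.countP (fun x => decide (P x))) : Int) := by
  induction xs with
  | nil => simp
  | cons a l ih =>
    simp only [List.map_cons, List.sum_cons, List.countP_cons, ih]
    by_cases h : P a
    · simp [h]; push_cast; ring
    · simp [h]

theorem pvAf_snoc (M : List (Int × Int)) (p : Int × Int) :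
    pvAf (M ++ [p]) = pvAf M + (if p.1 ≠ p.2 then pvCnt M (p.2, p.1) else 0) := by
  rw [pvAf_eq_sum, pvAf_eq_sum, pvS_append, List.map_append, List.sum_append]
  have h1 : (pvS M).map (pvG (M ++ [p]))
      = (pvS M).map (fun ip => pvG M ip + (if p.1 ≠ p.2 ∧ ip.2 = (p.2, p.1) then 1 else 0)) :=
    List.map_congr_left (fun ip hip => pvG_snoc M p ip (pvS_fst_lt M ip hip))
  rw [h1, PySem.List.sum_map_add_int]
  have h2 : ((if p.1 ≠ p.2 then [((M.length : Int), p)] else []).map (pvG (M ++ [p]))).sum = 0 := by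
    split_ifs with h
    · simp [pvG_last M p]
    · simp
  rw [h2, add_zero]
  congr 1
  by_cases h : p.1 = p.2
  · simp [h]
  · simp only [ne_eq, h, not_false_eq_true, true_and, if_true]
    rw [pvSum_map_ite_prop, pvCnt_eq_countP]


theorem pvA_eq_Af (curr_locs next_locs : List Int) :
    count_edge_collsions curr_locs next_locs = pvAf (curr_locs.zip next_locs) := by
  unfold count_edge_collsions pvAf
  rw [show (curr_locs.zip next_locs).map Prod.swap = next_locs.zip curr_locs from List.zip_swap ..]

theorem pvRef_snoc (M : List (Int × Int)) (p : Int × Int) :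
    ∀ prev, pvRef prev (M ++ [p])
      = pvRef prev M + (if p.1 ≠ p.2 then pvCnt (prev ++ M) (p.2, p.1) else 0) := by
  induction M with
  | nil => intro prev; simp [pvRef]
  | cons q rest ih =>
    intro prev
    show (if q.1 ≠ q.2 then pvCnt prev (q.2, q.1) else 0) + pvRef (prev ++ [q]) (rest ++ [p]) = _
    rw [ih (prev ++ [q])]
    show _ = (if q.1 ≠ q.2 then pvCnt prev (q.2, q.1) else 0) + pvRef (prev ++ [q]) rest + _
    rw [List.append_assoc]
    ring_nf
    rfl

theorem pvAf_eq_ref (M : List (Int × Int)) : pvAf M = pvRef [] M := by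
  induction M using List.reverseRecOn with
  | nil => rfl
  | append_singleton M p ih =>
    rw [pvAf_snoc, pvRef_snoc, ih]
    simp

-- ===== VERDICT (by name: the statement is the Claim_ definition above) =====
theorem count_edge_collsions_spec : Claim_equal_count_edge_collsions := by
  intro curr_locs next_locs _
  show count_edge_collsions curr_locs next_locs = count_edge_collsions_alt curr_locs next_locs
  rw [pvA_eq_Af, pvAf_eq_ref, count_edge_collsions_alt,
    pvBGo_eq_ref _ [] _ 0 (fun k => pvDict_empty_getD k)]
  simp
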